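-- pv_equiv track=rewrite | github.com/duykha0205/Algorithm | hackerank/knightlOnAChessboard.py | knightlOnAChessboard
-- ===== SOURCE A (Python) =====
-- from collections import deque
--
-- def knightlOnAChessboard(n):
--     # Create an n x n board
--     board = [[0 for _ in range(n)] for _ in range(n)]
--
--
--
--     # Define BFS function to find shortest path from (0,0) to (n-1,n-1)
--     def bfs(x, y):
--         queue = deque([(0, 0, 0)])
--         visited = set([(0, 0)])
--
--         # Define possible moves of the knight
--         moves = [(x,y), (y,x), (-x,y), (-y,x), (x,-y), (y,-x), (-x,-y), (-y,-x)]
--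
--         while queue:
--             a, b, steps = queue.popleft()
--             if a == n-1 and b == n-1:
--                 return steps
--             for dx, dy in moves:
--                 nx, ny = a + dx, b + dy
--
--                 if 0 <= nx < n and 0 <= ny < n and (nx, ny) not in visited:
--                     visited.add((nx, ny))
--                     queue.append((nx, ny, steps+1))
--
--         return -1
--
--     # Fill the board with the number of steps needed to reach each cell
--     for i in range(1, n):
--         for j in range(1, n):
--             board[i][j] = bfs(i, j)
--
--
--     # Return the board except for the bottom-right cell
--     return [row[1:] for row in board[1:]]
-- ===== SOURCE B (Python) =====
-- def knightlOnAChessboard(n):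
--     # Bitboard relaxation: the set of reached cells is one big integer with bit
--     # i*n+j standing for cell (i,j).  Each round ORs in eight mask-and-shift
--     # copies of the whole board (one per move); the first round with the corner
--     # bit set is the distance, a fixed point without it means unreachable.
--     # No queue, no visited set, no per-cell work.
--     def dist(x, y):
--         moves = [(x, y), (y, x), (-x, y), (-y, x),
--                  (x, -y), (y, -x), (-x, -y), (-y, -x)]
--         masks = []
--         for dx, dy in moves:
--             # single-row mask of columns j with 0 <= j < n and 0 <= j+dy < n
--             lo, hi = max(0, -dy), min(n, n - dy)
--             row = ((1 << (hi - lo)) - 1) << lo if lo < hi else 0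
--             mask = 0
--             for i in range(max(0, -dx), min(n, n - dx)):
--                 mask |= row << (i * n)
--             masks.append((mask, dx * n + dy))
--         reach = 1  # bit 0 = cell (0,0)
--         corner = n * n - 1
--         for d in range(n * n):
--             if (reach >> corner) & 1:
--                 return d
--             nxt = reach
--             for mask, s in masks:
--                 part = reach & mask
--                 nxt |= part << s if s >= 0 else part >> -s
--             if nxt == reach:
--                 return -1
--             reach = nxt
--         return -1
--     return [[dist(i, j) for j in range(1, n)] for i in range(1, n)]
-- ===== Notes on version B (the rewrite author's own statement) =====
-- stated objective: faster
-- what changed: The per-cell queue BFS with a visited set of coordinate pairs is replaced by a bitboard relaxation: the reached set is one big integer (bit i*n+j = cell (i,j)) that each round is ORed with eight mask-and-shift copies of itself, returning the first round whose corner bit is set, or the unreachable sentinel once a fixed point is hit; the mutate-then-slice board construction is replaced by building the result directly as a nested comprehension.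
import Mathlib
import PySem

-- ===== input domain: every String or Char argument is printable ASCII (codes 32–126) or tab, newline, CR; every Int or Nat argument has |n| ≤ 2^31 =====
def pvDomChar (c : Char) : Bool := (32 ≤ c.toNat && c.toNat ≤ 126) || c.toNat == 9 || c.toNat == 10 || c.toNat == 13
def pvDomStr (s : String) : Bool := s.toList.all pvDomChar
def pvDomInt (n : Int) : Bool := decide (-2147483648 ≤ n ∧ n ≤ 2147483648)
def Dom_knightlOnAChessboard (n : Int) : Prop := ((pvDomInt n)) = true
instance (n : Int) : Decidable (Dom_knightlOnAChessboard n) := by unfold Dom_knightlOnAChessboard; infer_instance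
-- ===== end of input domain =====

-- B replaces the per-cell queue BFS by a bitboard relaxation (the reached set is one big Nat,
-- each round ORed with eight mask-and-shift copies of itself; first round reaching the corner bit
-- is the distance, a fixed point without it means unreachable), and builds the result directly
-- instead of mutating and slicing (objective: faster, by word-level bit-parallelism).

-- ===== PORT A =====
-- the eight KnightL(x,y) moves, as in A's `moves` list
def knightMovesA (x y : Int) : List (Int × Int) :=
  [(x, y), (y, x), (-x, y), (-y, x), (x, -y), (y, -x), (-x, -y), (-y, -x)]

-- body of A's `for dx, dy in moves` loop: state = (queue-after-popped-head, visited)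
def bfsInnerA (n a b steps : Int) (st : List (Int × Int × Int) × PySem.Set (Int × Int))
    (m : Int × Int) : List (Int × Int × Int) × PySem.Set (Int × Int) :=
  let nx := a + m.1
  let ny := b + m.2
  if 0 ≤ nx ∧ nx < n ∧ 0 ≤ ny ∧ ny < n ∧ ¬ PySem.Set.contains st.2 (nx, ny) then
    (st.1 ++ [(nx, ny, steps + 1)], PySem.Set.add st.2 (nx, ny))
  else st

-- A's `while queue` loop; fuel (n*n)+1 bounds the number of pops (each pop was enqueued, and each
-- enqueue adds a fresh board cell to `visited`), so the 0-fuel default is never reached.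
def bfsLoopA (n : Int) (moves : List (Int × Int)) :
    Nat → List (Int × Int × Int) → PySem.Set (Int × Int) → Int
  | 0, _, _ => -1
  | fuel + 1, queue, visited =>
    match queue with
    | [] => -1
    | (a, b, steps) :: rest =>
      if a = n - 1 ∧ b = n - 1 then steps
      else
        let st := moves.foldl (bfsInnerA n a b steps) (rest, visited)
        bfsLoopA n moves fuel st.1 st.2

-- A's local `bfs(x, y)`
def bfsA (n x y : Int) : Int :=
  bfsLoopA n (knightMovesA x y) ((n * n).toNat + 1) [(0, 0, 0)]
    (PySem.Set.ofList [((0 : Int), (0 : Int))])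

def knightlOnAChessboard (n : Int) : List (List Int) :=
  -- board = [[0]*n]*n
  let board0 := (PySem.List.pyRange 0 n 1).map (fun _ => (PySem.List.pyRange 0 n 1).map (fun _ => (0 : Int)))
  -- for i in range(1,n): for j in range(1,n): board[i][j] = bfs(i,j)
  let board := (PySem.List.pyRange 1 n 1).foldl (fun bd i =>
      (PySem.List.pyRange 1 n 1).foldl (fun bd2 j =>
        PySem.List.pySetD bd2 i (PySem.List.pySetD (PySem.List.pyGetD bd2 i []) j (bfsA n i j))) bd) board0
  -- return [row[1:] for row in board[1:]]
  (PySem.List.slice board (some 1) none).map (fun row => PySem.List.slice row (some 1) none)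

-- ===== PORT B =====
-- the same eight moves, as in B's `moves` list
def knightMovesB (x y : Int) : List (Int × Int) :=
  [(x, y), (y, x), (-x, y), (-y, x), (x, -y), (y, -x), (-x, -y), (-y, -x)]

-- B's single-row mask: columns j with 0 <= j < n and 0 <= j+dy < n
def rowMaskB (n dy : Int) : Nat :=
  let lo := max 0 (-dy)
  let hi := min n (n - dy)
  if lo < hi then ((1 <<< (hi - lo).toNat) - 1) <<< lo.toNat else 0

-- B's per-move source mask: OR of the row mask over the valid rows (bit i*n+j = cell (i,j))
def moveMaskB (n dx dy : Int) : Nat :=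
  (PySem.List.pyRange (max 0 (-dx)) (min n (n - dx)) 1).foldl
    (fun mask i => mask ||| (rowMaskB n dy <<< (i * n).toNat)) 0

-- B's `masks` list: (source mask, signed bit shift) per move
def masksB (n : Int) (ms : List (Int × Int)) : List (Nat × Int) :=
  ms.map (fun m => (moveMaskB n m.1 m.2, m.1 * n + m.2))

-- one relaxation round: B's `for mask, s in masks: nxt |= part << s if s >= 0 else part >> -s`
def stepBits (masks : List (Nat × Int)) (reach : Nat) : Nat :=
  masks.foldl (fun (nxt : Nat) (mk : Nat × Int) =>
    nxt ||| (if 0 ≤ mk.2 then (reach &&& mk.1) <<< mk.2.toNat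
             else (reach &&& mk.1) >>> (-mk.2).toNat)) reach

-- B's `for d in range(n*n)` loop: test the corner bit, relax, stop at a fixed point
def bitLoop (n : Int) (masks : List (Nat × Int)) : Nat → Nat → Int → Int
  | 0, _, _ => -1
  | fuel + 1, reach, d =>
    if (reach >>> (n * n - 1).toNat) &&& 1 ≠ 0 then d
    else
      let nxt := stepBits masks reach
      if nxt = reach then -1 else bitLoop n masks fuel nxt (d + 1)

-- B's local `dist(x, y)`; reach starts as bit 0 = cell (0,0)
def distB (n x y : Int) : Int :=
  bitLoop n (masksB n (knightMovesB x y)) (n * n).toNat 1 0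

def knightlOnAChessboard_alt (n : Int) : List (List Int) :=
  (PySem.List.pyRange 1 n 1).map (fun i => (PySem.List.pyRange 1 n 1).map (fun j => distB n i j))

-- ===== PRECONDITION & SPEC =====
def Spec_knightlOnAChessboard (n : Int) (out : List (List Int)) : Prop := out = knightlOnAChessboard_alt n
instance (n : Int) (out : List (List Int)) : Decidable (Spec_knightlOnAChessboard n out) := by unfold Spec_knightlOnAChessboard; infer_instance

-- ===== CLAIM (what is proved, stated in full; the proofs are below) =====
def Claim_equal_knightlOnAChessboard : Prop := ∀ (n : Int), Dom_knightlOnAChessboard n → Spec_knightlOnAChessboard n (knightlOnAChessboard n)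

-- ===== LEMMAS AND PROOFS =====

-- a cell of the n×n board
def inGrid (n : Int) (p : Int × Int) : Prop := 0 ≤ p.1 ∧ p.1 < n ∧ 0 ≤ p.2 ∧ p.2 < n

-- visited-set invariant of the BFS loops
def InvV (n : Int) (v : PySem.Set (Int × Int)) : Prop := v.Nodup ∧ ∀ p ∈ v, inGrid n p

-- proof-side intermediate: a level-synchronous BFS (frontier list + visited set), used as the
-- stepping stone between A's queue BFS and B's grid relaxation
def innerMoveB (n : Int) (cell : Int × Int) (st : PySem.Set (Int × Int) × List (Int × Int))
    (m : Int × Int) : PySem.Set (Int × Int) × List (Int × Int) :=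
  let p := (cell.1 + m.1, cell.2 + m.2)
  if 0 ≤ p.1 ∧ p.1 < n ∧ 0 ≤ p.2 ∧ p.2 < n ∧ ¬ PySem.Set.contains st.1 p then
    (PySem.Set.add st.1 p, st.2 ++ [p])
  else st

def expandCellB (n : Int) (moves : List (Int × Int)) (st : PySem.Set (Int × Int) × List (Int × Int))
    (cell : Int × Int) : PySem.Set (Int × Int) × List (Int × Int) :=
  moves.foldl (innerMoveB n cell) st

def bfsLoopB (n : Int) (moves : List (Int × Int)) :
    Nat → List (Int × Int) → PySem.Set (Int × Int) → Int → Int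
  | 0, _, _, _ => -1
  | fuel + 1, frontier, visited, d =>
    if frontier = [] then -1
    else if (n - 1, n - 1) ∈ frontier then d
    else
      let st := frontier.foldl (expandCellB n moves) (visited, [])
      bfsLoopB n moves fuel st.2 st.1 (d + 1)

theorem card_bound {n : Int} {v : PySem.Set (Int × Int)} (h : InvV n v) :
    v.length ≤ (n * n).toNat := by
  have hsub : v.toFinset ⊆ (Finset.Ico 0 n) ×ˢ (Finset.Ico 0 n) := by
    intro p hp
    have := h.2 p (List.mem_toFinset.mp hp)
    simp only [Finset.mem_product, Finset.mem_Ico]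
    exact ⟨⟨this.1, this.2.1⟩, this.2.2.1, this.2.2.2⟩
  have h1 : v.length ≤ n.toNat * n.toNat := by
    calc v.length = v.toFinset.card := (List.toFinset_card_of_nodup h.1).symm
      _ ≤ ((Finset.Ico 0 n) ×ˢ (Finset.Ico 0 n)).card := Finset.card_le_card hsub
      _ = n.toNat * n.toNat := by
          rw [Finset.card_product, Int.card_Ico]; simp
  by_cases hn : 0 ≤ n
  · rwa [Int.toNat_mul hn hn]
  · have h0 : n.toNat = 0 := by omega
    rw [h0] at h1
    simp at h1
    simp [h1]

-- A's move fold is the level BFS's move fold with the new cells tagged with steps+1 and queued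
theorem stepAB (n steps : Int) (cell : Int × Int) :
    ∀ (ms : List (Int × Int)) (rest : List (Int × Int × Int)) (v : PySem.Set (Int × Int))
      (acc : List (Int × Int)),
      ms.foldl (bfsInnerA n cell.1 cell.2 steps) (rest ++ acc.map (fun p => (p.1, p.2, steps + 1)), v)
      = (rest ++ ((ms.foldl (innerMoveB n cell) (v, acc)).2).map (fun p => (p.1, p.2, steps + 1)),
         (ms.foldl (innerMoveB n cell) (v, acc)).1) := by
  intro ms
  induction ms with
  | nil => intro rest v acc; rfl
  | cons m ms ih =>
    intro rest v acc
    simp only [List.foldl_cons]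
    by_cases hc : 0 ≤ cell.1 + m.1 ∧ cell.1 + m.1 < n ∧ 0 ≤ cell.2 + m.2 ∧ cell.2 + m.2 < n ∧
        ¬ PySem.Set.contains v (cell.1 + m.1, cell.2 + m.2)
    · have hA : bfsInnerA n cell.1 cell.2 steps (rest ++ acc.map (fun p => (p.1, p.2, steps + 1)), v) m
          = ((rest ++ acc.map (fun p => (p.1, p.2, steps + 1))) ++ [(cell.1 + m.1, cell.2 + m.2, steps + 1)],
             PySem.Set.add v (cell.1 + m.1, cell.2 + m.2)) := by
        simp only [bfsInnerA, if_pos hc]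
      have hB : innerMoveB n cell (v, acc) m
          = (PySem.Set.add v (cell.1 + m.1, cell.2 + m.2), acc ++ [(cell.1 + m.1, cell.2 + m.2)]) := by
        simp only [innerMoveB, if_pos hc]
      rw [hA, hB]
      have := ih ((rest : List (Int × Int × Int))) (PySem.Set.add v (cell.1 + m.1, cell.2 + m.2))
        (acc ++ [(cell.1 + m.1, cell.2 + m.2)])
      simpa [List.append_assoc] using this
    · have hA : bfsInnerA n cell.1 cell.2 steps (rest ++ acc.map (fun p => (p.1, p.2, steps + 1)), v) m
          = (rest ++ acc.map (fun p => (p.1, p.2, steps + 1)), v) := by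
        simp only [bfsInnerA, if_neg hc]
      have hB : innerMoveB n cell (v, acc) m = (v, acc) := by
        simp only [innerMoveB, if_neg hc]
      rw [hA, hB]
      exact ih rest v acc

-- what one cell's move fold does to the state (shape: visited and frontier grow by the same delta)
theorem moveFold_spec (n : Int) (cell : Int × Int) :
    ∀ (ms : List (Int × Int)) (st : PySem.Set (Int × Int) × List (Int × Int)),
      st.1.Nodup →
      ∃ delta, ms.foldl (innerMoveB n cell) st = (st.1 ++ delta, st.2 ++ delta)
        ∧ (∀ p ∈ delta, inGrid n p) ∧ (st.1 ++ delta).Nodup := by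
  intro ms
  induction ms with
  | nil =>
    intro st hnd
    exact ⟨[], by simp, by simp, by simpa using hnd⟩
  | cons m ms ih =>
    intro st hnd
    simp only [List.foldl_cons]
    by_cases hc : 0 ≤ cell.1 + m.1 ∧ cell.1 + m.1 < n ∧ 0 ≤ cell.2 + m.2 ∧ cell.2 + m.2 < n ∧
        ¬ PySem.Set.contains st.1 (cell.1 + m.1, cell.2 + m.2)
    · have hpm : (cell.1 + m.1, cell.2 + m.2) ∉ st.1 := by
        intro hmem
        exact hc.2.2.2.2 ((PySem.Set.contains_iff st.1 _).mpr hmem)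
      have hstep : innerMoveB n cell st m
          = (st.1 ++ [(cell.1 + m.1, cell.2 + m.2)], st.2 ++ [(cell.1 + m.1, cell.2 + m.2)]) := by
        simp only [innerMoveB, if_pos hc]
        rw [PySem.Set.add_of_not_mem hpm]
      rw [hstep]
      have hnd' : (st.1 ++ [(cell.1 + m.1, cell.2 + m.2)]).Nodup := by
        rw [List.nodup_append]
        refine ⟨hnd, by simp, ?_⟩
        intro q hq b hb
        simp only [List.mem_singleton] at hb
        subst hb
        intro h
        exact hpm (h ▸ hq)
      obtain ⟨delta, heq, hgrid, hnodup⟩ :=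
        ih (st.1 ++ [(cell.1 + m.1, cell.2 + m.2)], st.2 ++ [(cell.1 + m.1, cell.2 + m.2)]) hnd'
      refine ⟨(cell.1 + m.1, cell.2 + m.2) :: delta, ?_, ?_, ?_⟩
      · simpa [List.append_assoc] using heq
      · intro p hp
        rcases List.mem_cons.mp hp with hp | hp
        · subst hp; exact ⟨hc.1, hc.2.1, hc.2.2.1, hc.2.2.2.1⟩
        · exact hgrid p hp
      · simpa [List.append_assoc] using hnodup
    · have hstep : innerMoveB n cell st m = st := by
        simp only [innerMoveB, if_neg hc]
      rw [hstep]
      exact ih st hnd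

-- what one whole level's fold does to the state
theorem levelFold_spec (n : Int) (ms : List (Int × Int)) :
    ∀ (front : List (Int × Int)) (st : PySem.Set (Int × Int) × List (Int × Int)),
      st.1.Nodup →
      ∃ delta, front.foldl (expandCellB n ms) st = (st.1 ++ delta, st.2 ++ delta)
        ∧ (∀ p ∈ delta, inGrid n p) ∧ (st.1 ++ delta).Nodup := by
  intro front
  induction front with
  | nil =>
    intro st hnd
    exact ⟨[], by simp, by simp, by simpa using hnd⟩
  | cons c front ih =>
    intro st hnd
    simp only [List.foldl_cons]
    obtain ⟨d1, heq1, hg1, hn1⟩ := moveFold_spec n c ms st hnd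
    have heq1' : expandCellB n ms st c = (st.1 ++ d1, st.2 ++ d1) := heq1
    rw [heq1']
    obtain ⟨d2, heq2, hg2, hn2⟩ := ih (st.1 ++ d1, st.2 ++ d1) hn1
    refine ⟨d1 ++ d2, ?_, ?_, ?_⟩
    · simpa [List.append_assoc] using heq2
    · intro p hp
      rcases List.mem_append.mp hp with hp | hp
      · exact hg1 p hp
      · exact hg2 p hp
    · simpa [List.append_assoc] using hn2

-- membership characterisation of the move fold's visited set
theorem moveFold_mem (n : Int) (cell : Int × Int) :
    ∀ (ms : List (Int × Int)) (st : PySem.Set (Int × Int) × List (Int × Int)) (p : Int × Int),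
      p ∈ (ms.foldl (innerMoveB n cell) st).1 ↔
        p ∈ st.1 ∨ ∃ m ∈ ms, p = (cell.1 + m.1, cell.2 + m.2) ∧ inGrid n p := by
  intro ms
  induction ms with
  | nil => intro st p; simp
  | cons m ms ih =>
    intro st p
    simp only [List.foldl_cons]
    rw [ih]
    by_cases hc : 0 ≤ cell.1 + m.1 ∧ cell.1 + m.1 < n ∧ 0 ≤ cell.2 + m.2 ∧ cell.2 + m.2 < n ∧
        ¬ PySem.Set.contains st.1 (cell.1 + m.1, cell.2 + m.2)
    · have h1 : (innerMoveB n cell st m).1 = PySem.Set.add st.1 (cell.1 + m.1, cell.2 + m.2) := by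
        simp only [innerMoveB, if_pos hc]
      have hg : inGrid n (cell.1 + m.1, cell.2 + m.2) := ⟨hc.1, hc.2.1, hc.2.2.1, hc.2.2.2.1⟩
      rw [h1]
      constructor
      · rintro (h | ⟨m', hm', he, hg'⟩)
        · rcases (PySem.Set.mem_add _ _ _).mp h with h | h
          · exact Or.inl h
          · exact Or.inr ⟨m, List.mem_cons_self, h, by rw [h]; exact hg⟩
        · exact Or.inr ⟨m', List.mem_cons_of_mem _ hm', he, hg'⟩
      · rintro (h | ⟨m', hm', he, hg'⟩)
        · exact Or.inl ((PySem.Set.mem_add _ _ _).mpr (Or.inl h))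
        · rcases List.mem_cons.mp hm' with rfl | hm''
          · exact Or.inl ((PySem.Set.mem_add _ _ _).mpr (Or.inr he))
          · exact Or.inr ⟨m', hm'', he, hg'⟩
    · have h1 : innerMoveB n cell st m = st := by
        simp only [innerMoveB, if_neg hc]
      rw [h1]
      constructor
      · rintro (h | ⟨m', hm', he, hg'⟩)
        · exact Or.inl h
        · exact Or.inr ⟨m', List.mem_cons_of_mem _ hm', he, hg'⟩
      · rintro (h | ⟨m', hm', he, hg'⟩)
        · exact Or.inl h
        · rcases List.mem_cons.mp hm' with rfl | hm''
          · subst he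
            cases hb : PySem.Set.contains st.1 (cell.1 + m'.1, cell.2 + m'.2) with
            | true => exact Or.inl ((PySem.Set.contains_iff _ _).mp hb)
            | false =>
              exact absurd ⟨hg'.1, hg'.2.1, hg'.2.2.1, hg'.2.2.2, by rw [hb]; simp⟩ hc
          · exact Or.inr ⟨m', hm'', he, hg'⟩

-- membership characterisation of one whole level's visited set
theorem levelFold_mem (n : Int) (ms : List (Int × Int)) :
    ∀ (front : List (Int × Int)) (st : PySem.Set (Int × Int) × List (Int × Int)) (p : Int × Int),
      p ∈ (front.foldl (expandCellB n ms) st).1 ↔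
        p ∈ st.1 ∨ ∃ c ∈ front, ∃ m ∈ ms, p = (c.1 + m.1, c.2 + m.2) ∧ inGrid n p := by
  intro front
  induction front with
  | nil => intro st p; simp
  | cons c front ih =>
    intro st p
    simp only [List.foldl_cons]
    rw [ih]
    have hc : (expandCellB n ms st c).1 = (ms.foldl (innerMoveB n c) st).1 := rfl
    rw [hc, moveFold_mem]
    constructor
    · rintro ((h | ⟨m, hm, he, hg⟩) | ⟨c', hc', m, hm, he, hg⟩)
      · exact Or.inl h
      · exact Or.inr ⟨c, List.mem_cons_self, m, hm, he, hg⟩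
      · exact Or.inr ⟨c', List.mem_cons_of_mem _ hc', m, hm, he, hg⟩
    · rintro (h | ⟨c', hc', m, hm, he, hg⟩)
      · exact Or.inl (Or.inl h)
      · rcases List.mem_cons.mp hc' with rfl | hc''
        · exact Or.inl (Or.inr ⟨m, hm, he, hg⟩)
        · exact Or.inr ⟨c', hc'', m, hm, he, hg⟩

theorem bfsLoopA_nil (n : Int) (ms : List (Int × Int)) (f : Nat) (v : PySem.Set (Int × Int)) :
    bfsLoopA n ms f [] v = -1 := by
  cases f <;> rfl

theorem bfsLoopB_nil (n : Int) (ms : List (Int × Int)) (f : Nat) (v : PySem.Set (Int × Int)) (d : Int) :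
    bfsLoopB n ms f [] v d = -1 := by
  cases f <;> simp [bfsLoopB]

-- A consumes one whole level of its queue
theorem levelA (n : Int) (ms : List (Int × Int)) (d : Int) :
    ∀ (front : List (Int × Int)) (f : Nat) (extra : List (Int × Int)) (v : PySem.Set (Int × Int)),
      bfsLoopA n ms (front.length + f)
          (front.map (fun p => (p.1, p.2, d)) ++ extra.map (fun p => (p.1, p.2, d + 1))) v
      = if (n - 1, n - 1) ∈ front then d
        else bfsLoopA n ms f
          (((front.foldl (expandCellB n ms) (v, extra)).2).map (fun p => (p.1, p.2, d + 1)))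
          (front.foldl (expandCellB n ms) (v, extra)).1 := by
  intro front
  induction front with
  | nil =>
    intro f extra v
    simp only [List.length_nil, Nat.zero_add, List.map_nil, List.nil_append, List.foldl_nil,
      List.not_mem_nil, if_false]
  | cons c fs ih =>
    intro f extra v
    have hfuel : (c :: fs).length + f = (fs.length + f) + 1 := by
      simp only [List.length_cons]; omega
    rw [hfuel]
    simp only [List.map_cons, List.cons_append]
    rw [show ((c.1, c.2, d) : Int × Int × Int) :: (fs.map (fun p => (p.1, p.2, d)) ++ extra.map (fun p => (p.1, p.2, d + 1)))
        = ((c.1, c.2, d) :: (fs.map (fun p => (p.1, p.2, d)) ++ extra.map (fun p => (p.1, p.2, d + 1)))) from rfl]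
    simp only [bfsLoopA]
    by_cases hc : c.1 = n - 1 ∧ c.2 = n - 1
    · rw [if_pos hc]
      have hmem : ((n - 1 : Int), (n - 1 : Int)) ∈ c :: fs := by
        have : c = (n - 1, n - 1) := by
          cases c; simp only [Prod.mk.injEq]; exact ⟨hc.1, hc.2⟩
        rw [← this]; exact List.mem_cons_self
      rw [if_pos hmem]
    · rw [if_neg hc]
      have hfold := stepAB n d c ms (fs.map (fun p => (p.1, p.2, d))) v extra
      rw [hfold]
      have hE : ((ms.foldl (innerMoveB n c) (v, extra)).1, (ms.foldl (innerMoveB n c) (v, extra)).2)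
          = ms.foldl (innerMoveB n c) (v, extra) := rfl
      have hihx := ih f (ms.foldl (innerMoveB n c) (v, extra)).2 (ms.foldl (innerMoveB n c) (v, extra)).1
      rw [hihx]
      have hcne : ((n - 1 : Int), (n - 1 : Int)) ∉ ([c] : List (Int × Int)) := by
        simp only [List.mem_singleton]
        intro h
        apply hc
        rw [← h]
        exact ⟨rfl, rfl⟩
      have hmem_iff : (((n - 1 : Int), (n - 1 : Int)) ∈ c :: fs) ↔ (((n - 1 : Int), (n - 1 : Int)) ∈ fs) := by
        constructor
        · intro h
          rcases List.mem_cons.mp h with h | h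
          · exact absurd (by simp [h]) hcne
          · exact h
        · exact fun h => List.mem_cons_of_mem _ h
      rw [List.foldl_cons]
      have hcell : expandCellB n ms (v, extra) c = ms.foldl (innerMoveB n c) (v, extra) := rfl
      rw [hcell, ← hE]
      by_cases hm : ((n - 1 : Int), (n - 1 : Int)) ∈ fs
      · rw [if_pos hm, if_pos (hmem_iff.mpr hm)]
      · rw [if_neg hm, if_neg (fun h => hm (hmem_iff.mp h))]

-- fuel measures
def muA (n : Int) (q : List (Int × Int × Int)) (v : PySem.Set (Int × Int)) : Nat :=
  q.length + ((n * n).toNat - v.length)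

def muB (n : Int) (front : List (Int × Int)) (v : PySem.Set (Int × Int)) : Nat :=
  if front = [] then 0 else ((n * n).toNat - v.length) + 1

theorem bridge (n : Int) (ms : List (Int × Int)) :
    ∀ (f fA : Nat) (front : List (Int × Int)) (v : PySem.Set (Int × Int)) (d : Int),
      InvV n v → muB n front v ≤ f → muA n (front.map (fun p => (p.1, p.2, d))) v ≤ fA →
      bfsLoopA n ms fA (front.map (fun p => (p.1, p.2, d))) v = bfsLoopB n ms f front v d := by
  intro f
  induction f with
  | zero =>
    intro fA front v d _ hmuB _
    have hf : front = [] := by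
      by_contra h
      simp only [muB, if_neg h] at hmuB
      omega
    subst hf
    rw [List.map_nil, bfsLoopA_nil, bfsLoopB_nil]
  | succ f ih =>
    intro fA front v d hInv hmuB hmuA
    cases front with
    | nil => rw [List.map_nil, bfsLoopA_nil, bfsLoopB_nil]
    | cons c fs =>
      have hlenfA : (c :: fs).length ≤ fA := by
        unfold muA at hmuA
        simp only [List.length_map] at hmuA
        omega
      obtain ⟨g, hg⟩ : ∃ g, fA = (c :: fs).length + g := ⟨fA - (c :: fs).length, by omega⟩
      subst hg
      have hlev := levelA n ms d (c :: fs) g [] v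
      simp only [List.map_nil, List.append_nil] at hlev
      rw [hlev]
      rw [show bfsLoopB n ms (f + 1) (c :: fs) v d
          = if (c :: fs) = [] then -1
            else if ((n - 1 : Int), (n - 1 : Int)) ∈ c :: fs then d
            else bfsLoopB n ms f ((c :: fs).foldl (expandCellB n ms) (v, [])).2
              ((c :: fs).foldl (expandCellB n ms) (v, [])).1 (d + 1) from rfl]
      rw [if_neg (List.cons_ne_nil c fs)]
      by_cases ht : ((n - 1 : Int), (n - 1 : Int)) ∈ c :: fs
      · rw [if_pos ht, if_pos ht]
      · rw [if_neg ht, if_neg ht]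
        obtain ⟨delta, heq, hgrid, hnodup⟩ := levelFold_spec n ms (c :: fs) (v, []) hInv.1
        simp only at heq
        rw [heq]
        simp only [List.nil_append]
        have hnodup' : (v ++ delta).Nodup := by simpa using hnodup
        have hInv' : InvV n (v ++ delta) := by
          refine ⟨hnodup', ?_⟩
          intro p hp
          rcases List.mem_append.mp hp with hp | hp
          · exact hInv.2 p hp
          · exact hgrid p hp
        have hcard := card_bound hInv'
        simp only [List.length_append] at hcard
        apply ih g delta (v ++ delta) (d + 1) hInv'
        · by_cases hd : delta = []
          · simp [muB, hd]
          · simp only [muB, if_neg hd, if_neg (List.cons_ne_nil c fs), List.length_append] at hmuB ⊢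
            have hlen : 1 ≤ delta.length := by
              cases delta with
              | nil => exact absurd rfl hd
              | cons _ _ => simp
            omega
        · unfold muA at hmuA ⊢
          simp only [List.length_map, List.length_append, List.length_cons] at hmuA ⊢
          omega

-- cell encoding: bit index of cell p on the n×n bitboard
def encB (n : Int) (p : Int × Int) : Nat := (p.1 * n + p.2).toNat

-- the bitboard represents exactly the visited set
def BitsOf (n : Int) (v : PySem.Set (Int × Int)) (r : Nat) : Prop :=
  ∀ t : Nat, r.testBit t = true ↔ ∃ p, p ∈ v ∧ inGrid n p ∧ t = encB n p

theorem encB_cast (n : Int) (p : Int × Int) (hg : inGrid n p) :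
    ((encB n p : Nat) : Int) = p.1 * n + p.2 := by
  obtain ⟨h1, h2, h3, h4⟩ := hg
  have hn : (0 : Int) ≤ n := by omega
  have hm : (0 : Int) ≤ p.1 * n := mul_nonneg h1 hn
  unfold encB
  rw [Int.toNat_of_nonneg (by omega)]

theorem encB_inj (n : Int) (p q : Int × Int) (hp : inGrid n p) (hq : inGrid n q)
    (h : encB n p = encB n q) : p = q := by
  have hp' := encB_cast n p hp
  have hq' := encB_cast n q hq
  have hh : p.1 * n + p.2 = q.1 * n + q.2 := by rw [← hp', ← hq', h]
  obtain ⟨a1, a2, a3, a4⟩ := hp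
  obtain ⟨b1, b2, b3, b4⟩ := hq
  have h1 : p.1 = q.1 := by
    rcases lt_trichotomy p.1 q.1 with hlt | heqq | hgt
    · have hle : (p.1 + 1) * n ≤ q.1 * n := mul_le_mul_of_nonneg_right (by omega) (by omega)
      have he : (p.1 + 1) * n = p.1 * n + n := by ring
      linarith
    · exact heqq
    · have hle : (q.1 + 1) * n ≤ p.1 * n := mul_le_mul_of_nonneg_right (by omega) (by omega)
      have he : (q.1 + 1) * n = q.1 * n + n := by ring
      linarith
  have h2 : p.2 = q.2 := by
    rw [h1] at hh
    linarith
  rw [Prod.ext_iff]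
  exact ⟨h1, h2⟩

-- bit t of a fold of ORs
theorem testBit_foldl_lor {α : Type} (f : α → Nat) :
    ∀ (l : List α) (init : Nat) (t : Nat),
      (l.foldl (fun acc x => acc ||| f x) init).testBit t = true ↔
        init.testBit t = true ∨ ∃ x ∈ l, (f x).testBit t = true := by
  intro l
  induction l with
  | nil => intro init t; simp
  | cons a l ih =>
    intro init t
    simp only [List.foldl_cons]
    rw [ih]
    rw [Nat.testBit_or]
    simp only [Bool.or_eq_true, List.mem_cons]
    constructor
    · rintro ((h | h) | ⟨x, hx, h⟩)
      · exact Or.inl h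
      · exact Or.inr ⟨a, Or.inl rfl, h⟩
      · exact Or.inr ⟨x, Or.inr hx, h⟩
    · rintro (h | ⟨x, hx | hx, h⟩)
      · exact Or.inl (Or.inl h)
      · subst hx; exact Or.inl (Or.inr h)
      · exact Or.inr ⟨x, hx, h⟩

theorem testBit_rowMask (n dy : Int) (b : Nat) :
    (rowMaskB n dy).testBit b = true ↔
      ((b : Int) < n ∧ 0 ≤ (b : Int) + dy ∧ (b : Int) + dy < n) := by
  unfold rowMaskB
  by_cases h : max 0 (-dy) < min n (n - dy)
  · rw [if_pos h]
    rw [Nat.testBit_shiftLeft,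
      show (1 <<< (min n (n - dy) - max 0 (-dy)).toNat) = 2 ^ ((min n (n - dy) - max 0 (-dy)).toNat) by
        simp [Nat.shiftLeft_eq],
      Nat.testBit_two_pow_sub_one]
    simp only [Bool.and_eq_true, decide_eq_true_eq, ge_iff_le]
    omega
  · rw [if_neg h]
    rw [Nat.zero_testBit]
    simp only [Bool.false_eq_true, false_iff]
    omega

theorem testBit_moveMask (n dx dy : Int) (t : Nat) :
    (moveMaskB n dx dy).testBit t = true ↔
      ∃ p : Int × Int, inGrid n p ∧ inGrid n (p.1 + dx, p.2 + dy) ∧ t = encB n p := by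
  have hiff : (moveMaskB n dx dy).testBit t = true ↔
      (0 : Nat).testBit t = true ∨
      ∃ i ∈ PySem.List.pyRange (max 0 (-dx)) (min n (n - dx)) 1,
        (rowMaskB n dy <<< (i * n).toNat).testBit t = true := by
    unfold moveMaskB
    exact testBit_foldl_lor (fun i : Int => rowMaskB n dy <<< (i * n).toNat)
      (PySem.List.pyRange (max 0 (-dx)) (min n (n - dx)) 1) 0 t
  rw [hiff, Nat.zero_testBit]
  simp only [Bool.false_eq_true, false_or]
  constructor
  · rintro ⟨i, hi, hbit⟩
    have hi' := PySem.List.mem_pyRange_one.mp hi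
    have hi0 : 0 ≤ i := by omega
    have hin : i < n := by omega
    have hn0 : 0 ≤ n := by omega
    have hK : ((i * n).toNat : Int) = i * n := Int.toNat_of_nonneg (mul_nonneg hi0 hn0)
    rw [Nat.testBit_shiftLeft] at hbit
    simp only [Bool.and_eq_true, decide_eq_true_eq, ge_iff_le] at hbit
    obtain ⟨hle, hrow⟩ := hbit
    rw [testBit_rowMask] at hrow
    have hcast : ((t - (i * n).toNat : Nat) : Int) = (t : Int) - i * n := by
      rw [Nat.cast_sub hle, hK]
    refine ⟨(i, (t : Int) - i * n), ⟨hi0, hin, ?_, ?_⟩, ⟨?_, ?_, ?_, ?_⟩, ?_⟩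
    · show (0 : Int) ≤ (t : Int) - i * n
      rw [← hcast]; exact Nat.cast_nonneg _
    · show (t : Int) - i * n < n
      rw [← hcast]; exact hrow.1
    · show (0 : Int) ≤ i + dx
      omega
    · show i + dx < n
      omega
    · show (0 : Int) ≤ ((t : Int) - i * n) + dy
      rw [← hcast]; exact hrow.2.1
    · show ((t : Int) - i * n) + dy < n
      rw [← hcast]; exact hrow.2.2
    · show t = (i * n + ((t : Int) - i * n)).toNat
      have hv : i * n + ((t : Int) - i * n) = (t : Int) := by ring
      rw [hv]
      simp
  · rintro ⟨p, ⟨g1, g2, g3, g4⟩, ⟨f1, f2, f3, f4⟩, rfl⟩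
    refine ⟨p.1, PySem.List.mem_pyRange_one.mpr (by omega), ?_⟩
    have hn0 : 0 ≤ n := by omega
    have hK : ((p.1 * n).toNat : Int) = p.1 * n := Int.toNat_of_nonneg (mul_nonneg g1 hn0)
    have henc := encB_cast n p ⟨g1, g2, g3, g4⟩
    have hle : (p.1 * n).toNat ≤ encB n p := by
      have : ((p.1 * n).toNat : Int) ≤ (encB n p : Int) := by rw [hK, henc]; linarith
      exact_mod_cast this
    rw [Nat.testBit_shiftLeft]
    simp only [Bool.and_eq_true, decide_eq_true_eq, ge_iff_le]
    refine ⟨hle, ?_⟩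
    rw [testBit_rowMask]
    have hcast : ((encB n p - (p.1 * n).toNat : Nat) : Int) = p.2 := by
      rw [Nat.cast_sub hle, hK, henc]; ring
    rw [hcast]
    exact ⟨g4, f3, f4⟩

-- bit t of a mask-and-shifted copy
theorem testBit_shifted (x : Nat) (sh : Int) (t : Nat) :
    (if 0 ≤ sh then x <<< sh.toNat else x >>> (-sh).toNat).testBit t = true ↔
      ∃ s : Nat, x.testBit s = true ∧ (t : Int) = (s : Int) + sh := by
  by_cases h : 0 ≤ sh
  · rw [if_pos h, Nat.testBit_shiftLeft]
    simp only [Bool.and_eq_true, decide_eq_true_eq, ge_iff_le]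
    constructor
    · rintro ⟨hle, hbit⟩
      exact ⟨t - sh.toNat, hbit, by omega⟩
    · rintro ⟨s, hbit, hcast⟩
      have h1 : sh.toNat ≤ t := by omega
      have h2 : t - sh.toNat = s := by omega
      exact ⟨h1, h2 ▸ hbit⟩
  · rw [if_neg h, Nat.testBit_shiftRight]
    constructor
    · intro hbit
      exact ⟨(-sh).toNat + t, hbit, by omega⟩
    · rintro ⟨s, hbit, hcast⟩
      have h2 : (-sh).toNat + t = s := by omega
      exact h2 ▸ hbit

-- bit t after one relaxation round
theorem testBit_stepBits (n : Int) (ms : List (Int × Int)) (reach : Nat) (t : Nat) :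
    (stepBits (masksB n ms) reach).testBit t = true ↔
      reach.testBit t = true ∨
      ∃ m ∈ ms, ∃ s : Nat, reach.testBit s = true ∧ (moveMaskB n m.1 m.2).testBit s = true ∧
        (t : Int) = (s : Int) + (m.1 * n + m.2) := by
  have hiff : (stepBits (masksB n ms) reach).testBit t = true ↔
      reach.testBit t = true ∨
      ∃ mk ∈ masksB n ms,
        ((if 0 ≤ mk.2 then (reach &&& mk.1) <<< mk.2.toNat
          else (reach &&& mk.1) >>> (-mk.2).toNat)).testBit t = true := by
    unfold stepBits
    exact testBit_foldl_lor
      (fun mk : Nat × Int => if 0 ≤ mk.2 then (reach &&& mk.1) <<< mk.2.toNat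
        else (reach &&& mk.1) >>> (-mk.2).toNat)
      (masksB n ms) reach t
  rw [hiff]
  constructor
  · rintro (h | ⟨mk, hmk, hbit⟩)
    · exact Or.inl h
    · unfold masksB at hmk
      obtain ⟨m, hm, rfl⟩ := List.mem_map.mp hmk
      rw [testBit_shifted] at hbit
      obtain ⟨s, hbit', hcast⟩ := hbit
      rw [Nat.testBit_and] at hbit'
      simp only [Bool.and_eq_true] at hbit'
      exact Or.inr ⟨m, hm, s, hbit'.1, hbit'.2, hcast⟩
  · rintro (h | ⟨m, hm, s, hr, hmask, hcast⟩)
    · exact Or.inl h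
    · refine Or.inr ⟨(moveMaskB n m.1 m.2, m.1 * n + m.2), ?_, ?_⟩
      · unfold masksB
        exact List.mem_map.mpr ⟨m, hm, rfl⟩
      · rw [testBit_shifted]
        refine ⟨s, ?_, hcast⟩
        rw [Nat.testBit_and]
        simp [hr, hmask]

-- target-cell encoding arithmetic
theorem encB_move (n : Int) (c m : Int × Int) (hc : inGrid n c)
    (hcm : inGrid n (c.1 + m.1, c.2 + m.2)) :
    ((encB n (c.1 + m.1, c.2 + m.2) : Nat) : Int) = (encB n c : Int) + (m.1 * n + m.2) := by
  rw [encB_cast n _ hcm, encB_cast n c hc]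
  simp only
  ring

-- closure invariant: every already-expanded visited cell has all its in-grid successors visited
def Closed (n : Int) (ms : List (Int × Int)) (front : List (Int × Int))
    (v : PySem.Set (Int × Int)) : Prop :=
  ∀ c ∈ v, c ∉ front → ∀ m ∈ ms, inGrid n (c.1 + m.1, c.2 + m.2) → (c.1 + m.1, c.2 + m.2) ∈ v

-- one relaxation round on the bitboard of the visited set represents one BFS level's visited set
theorem stepBits_bitsOf (n : Int) (ms : List (Int × Int)) (front : List (Int × Int))
    (v : PySem.Set (Int × Int)) (hInv : InvV n v) (hsub : ∀ p ∈ front, p ∈ v)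
    (hCl : Closed n ms front v) (reach : Nat) (hb : BitsOf n v reach) :
    BitsOf n (front.foldl (expandCellB n ms) (v, [])).1 (stepBits (masksB n ms) reach) := by
  intro t
  rw [testBit_stepBits]
  constructor
  · rintro (h | ⟨m, hm, s, hr, hmask, hcast⟩)
    · obtain ⟨p, hpv, hpg, hpt⟩ := (hb t).mp h
      exact ⟨p, (levelFold_mem n ms front (v, []) p).mpr (Or.inl hpv), hpg, hpt⟩
    · obtain ⟨q, hqv, hqg, hqs⟩ := (hb s).mp hr
      obtain ⟨p', hp'g, hp'mg, hp's⟩ := (testBit_moveMask n m.1 m.2 s).mp hmask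
      have hpq : p' = q := encB_inj n p' q hp'g hqg (by rw [← hp's, ← hqs])
      subst hpq
      have htv : (t : Int) = (encB n (p'.1 + m.1, p'.2 + m.2) : Int) := by
        rw [encB_move n p' m hp'g hp'mg, ← hp's]
        exact hcast
      have ht : t = encB n (p'.1 + m.1, p'.2 + m.2) := by exact_mod_cast htv
      by_cases hf : p' ∈ front
      · exact ⟨(p'.1 + m.1, p'.2 + m.2),
          (levelFold_mem n ms front (v, []) _).mpr (Or.inr ⟨p', hf, m, hm, rfl, hp'mg⟩),
          hp'mg, ht⟩
      · exact ⟨(p'.1 + m.1, p'.2 + m.2),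
          (levelFold_mem n ms front (v, []) _).mpr (Or.inl (hCl p' hqv hf m hm hp'mg)),
          hp'mg, ht⟩
  · rintro ⟨p, hpf, hpg, rfl⟩
    rcases (levelFold_mem n ms front (v, []) p).mp hpf with hpv | ⟨c, hcf, m, hm, rfl, _⟩
    · exact Or.inl ((hb _).mpr ⟨p, hpv, hpg, rfl⟩)
    · have hcv := hsub c hcf
      have hcg := hInv.2 c hcv
      refine Or.inr ⟨m, hm, encB n c, (hb _).mpr ⟨c, hcv, hcg, rfl⟩,
        (testBit_moveMask n m.1 m.2 _).mpr ⟨c, hcg, hpg, rfl⟩, ?_⟩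
      exact encB_move n c m hcg hpg

-- the corner test reads exactly "corner visited"
theorem corner_bit (n : Int) (hn : 1 ≤ n) (v : PySem.Set (Int × Int)) (reach : Nat)
    (hb : BitsOf n v reach) :
    ((reach >>> (n * n - 1).toNat) &&& 1 ≠ 0) ↔ (n - 1, n - 1) ∈ v := by
  have h1 : ((reach >>> (n * n - 1).toNat) &&& 1 ≠ 0) ↔ reach.testBit ((n * n - 1).toNat) = true := by
    simp [Nat.testBit, Nat.and_one_is_mod]
  rw [h1, hb]
  have hcg : inGrid n (n - 1, n - 1) := ⟨by omega, by omega, by omega, by omega⟩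
  have henc : encB n (n - 1, n - 1) = (n * n - 1).toNat := by
    unfold encB
    congr 1
    ring
  constructor
  · rintro ⟨p, hpv, hpg, hpt⟩
    have hp : p = (n - 1, n - 1) := encB_inj n p (n - 1, n - 1) hpg hcg (by rw [← hpt, henc])
    rwa [← hp]
  · intro hmem
    exact ⟨(n - 1, n - 1), hmem, hcg, henc.symm⟩

-- the main bridge: the level BFS equals B's bitboard relaxation loop
theorem bridge2 (n : Int) (ms : List (Int × Int)) (hn : 1 ≤ n) :
    ∀ (fB fL : Nat) (front : List (Int × Int)) (v : PySem.Set (Int × Int)) (d : Int)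
      (reach : Nat),
      InvV n v → (∀ p ∈ front, p ∈ v) → Closed n ms front v →
      ((n - 1, n - 1) ∈ v → (n - 1, n - 1) ∈ front) →
      (front ≠ [] → (n * n).toNat + 1 ≤ fB + v.length) →
      muB n front v ≤ fL →
      BitsOf n v reach →
      bfsLoopB n ms fL front v d = bitLoop n (masksB n ms) fB reach d := by
  intro fB
  induction fB with
  | zero =>
    intro fL front v d reach hInv _ _ _ hcnt _ _
    have hf : front = [] := by
      by_contra h
      have := hcnt h
      have := card_bound hInv
      omega
    subst hf
    rw [bfsLoopB_nil]
    rfl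
  | succ fB ih =>
    intro fL front v d reach hInv hsub hCl htgt hcnt hmu hb
    rw [show bitLoop n (masksB n ms) (fB + 1) reach d
        = if (reach >>> (n * n - 1).toNat) &&& 1 ≠ 0 then d
          else if stepBits (masksB n ms) reach = reach then -1
            else bitLoop n (masksB n ms) fB (stepBits (masksB n ms) reach) (d + 1)
        from rfl]
    by_cases hv : (n - 1, n - 1) ∈ v
    · -- found: the corner is visited, hence on the current frontier
      have hf := htgt hv
      have hne : front ≠ [] := by intro h; rw [h] at hf; exact List.not_mem_nil hf
      have hfL : 1 ≤ fL := by
        simp only [muB, if_neg hne] at hmu; omega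
      obtain ⟨fLp, rfl⟩ : ∃ fLp, fL = fLp + 1 := ⟨fL - 1, by omega⟩
      rw [show bfsLoopB n ms (fLp + 1) front v d
          = if front = [] then -1
            else if ((n - 1 : Int), (n - 1 : Int)) ∈ front then d
            else bfsLoopB n ms fLp (front.foldl (expandCellB n ms) (v, [])).2
              (front.foldl (expandCellB n ms) (v, [])).1 (d + 1) from rfl]
      rw [if_neg hne, if_pos hf, if_pos ((corner_bit n hn v reach hb).mpr hv)]
    · rw [if_neg (fun h => hv ((corner_bit n hn v reach hb).mp h))]
      obtain ⟨delta, heq, hgrid, hnodup⟩ := levelFold_spec n ms front (v, []) hInv.1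
      simp only at heq
      have hv1 : (front.foldl (expandCellB n ms) (v, [])).1 = v ++ delta := by rw [heq]
      have hv2 : (front.foldl (expandCellB n ms) (v, [])).2 = delta := by rw [heq]; simp
      have hnodup' : (v ++ delta).Nodup := by simpa using hnodup
      have hdisj := (List.nodup_append.mp hnodup').2.2
      have hstep := stepBits_bitsOf n ms front v hInv hsub hCl reach hb
      rw [hv1] at hstep
      cases front with
      | nil =>
        -- empty frontier: the fold is the identity, so the bitboard is a fixed point; both -1
        rw [bfsLoopB_nil]
        have hd0 : delta = [] := by
          cases hdd : delta with
          | nil => rfl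
          | cons a l =>
            exfalso
            have : a ∈ (v, ([] : List (Int × Int))).1 := by
              have : ([] : List (Int × Int)).foldl (expandCellB n ms) (v, []) = (v, []) := rfl
              rw [← this, heq, hdd]
              simp
            exact hdisj _ this _ (by rw [hdd]; exact List.mem_cons_self) rfl
        have hfix : stepBits (masksB n ms) reach = reach := by
          apply Nat.eq_of_testBit_eq
          intro i
          rw [Bool.eq_iff_iff, hstep, hd0, List.append_nil, hb]
        rw [if_pos hfix]
      | cons c fs =>
        have hne : (c :: fs : List (Int × Int)) ≠ [] := List.cons_ne_nil c fs
        have hfL : 1 ≤ fL := by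
          simp only [muB, if_neg hne] at hmu; omega
        obtain ⟨fLp, rfl⟩ : ∃ fLp, fL = fLp + 1 := ⟨fL - 1, by omega⟩
        have hnf : ((n - 1 : Int), (n - 1 : Int)) ∉ (c :: fs : List (Int × Int)) :=
          fun h => hv (hsub _ h)
        rw [show bfsLoopB n ms (fLp + 1) (c :: fs) v d
            = if (c :: fs : List (Int × Int)) = [] then -1
              else if ((n - 1 : Int), (n - 1 : Int)) ∈ (c :: fs : List (Int × Int)) then d
              else bfsLoopB n ms fLp ((c :: fs).foldl (expandCellB n ms) (v, [])).2
                ((c :: fs).foldl (expandCellB n ms) (v, [])).1 (d + 1) from rfl]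
        rw [if_neg hne, if_neg hnf, hv1, hv2]
        have hInv' : InvV n (v ++ delta) := by
          refine ⟨hnodup', ?_⟩
          intro p hp
          rcases List.mem_append.mp hp with hp | hp
          · exact hInv.2 p hp
          · exact hgrid p hp
        by_cases hd : delta = []
        · -- fixed point: nothing new was reached, both sides return -1
          have hfix : stepBits (masksB n ms) reach = reach := by
            apply Nat.eq_of_testBit_eq
            intro i
            rw [Bool.eq_iff_iff, hstep, hd, List.append_nil, hb]
          rw [if_pos hfix]
          subst hd
          rw [bfsLoopB_nil]
        · -- progress: the bitboard changed; recurse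
          have hnfix : ¬ (stepBits (masksB n ms) reach = reach) := by
            intro habs
            obtain ⟨p0, hp0⟩ : ∃ p0, p0 ∈ delta := by
              cases delta with
              | nil => exact absurd rfl hd
              | cons a l => exact ⟨a, List.mem_cons_self⟩
            have hg0 := hgrid p0 hp0
            have hbit : (stepBits (masksB n ms) reach).testBit (encB n p0) = true :=
              (hstep (encB n p0)).mpr ⟨p0, List.mem_append_right _ hp0, hg0, rfl⟩
            rw [habs, hb] at hbit
            obtain ⟨q, hqv, hqg, hqt⟩ := hbit
            have : q = p0 := encB_inj n q p0 hqg hg0 hqt.symm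
            subst this
            exact hdisj _ hqv _ hp0 rfl
          rw [if_neg hnfix]
          have hcl' : Closed n ms delta (v ++ delta) := by
            intro p hp hpd m hm hg
            rcases List.mem_append.mp hp with hpv | hpdelta
            · by_cases hpf : p ∈ (c :: fs : List (Int × Int))
              · have hmm := (levelFold_mem n ms (c :: fs) (v, []) (p.1 + m.1, p.2 + m.2)).mpr
                  (Or.inr ⟨p, hpf, m, hm, rfl, hg⟩)
                rw [hv1] at hmm
                exact hmm
              · exact List.mem_append_left _ (hCl p hpv hpf m hm hg)
            · exact absurd hpdelta hpd
          have hcard' := card_bound hInv'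
          simp only [List.length_append] at hcard'
          have hlend : 1 ≤ delta.length := by
            cases delta with
            | nil => exact absurd rfl hd
            | cons _ _ => simp
          apply ih fLp delta (v ++ delta) (d + 1) (stepBits (masksB n ms) reach) hInv'
            (fun p hp => List.mem_append_right _ hp) hcl'
          · intro hvd
            rcases List.mem_append.mp hvd with h | h
            · exact absurd h hv
            · exact h
          · intro _
            have := hcnt hne
            simp only [List.length_append]
            omega
          · simp only [muB, if_neg hd, if_neg hne, List.length_append] at hmu ⊢
            omega
          · exact hstep

theorem bfsA_eq_distB (n x y : Int) (hn : 1 ≤ n) : bfsA n x y = distB n x y := by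
  unfold bfsA distB
  rw [show knightMovesA x y = knightMovesB x y from rfl]
  have hv0 : PySem.Set.ofList [((0 : Int), (0 : Int))] = [((0 : Int), (0 : Int))] := rfl
  rw [hv0]
  have hq0 : ([((0 : Int), (0 : Int), (0 : Int))] : List (Int × Int × Int))
      = ([((0 : Int), (0 : Int))] : List (Int × Int)).map (fun p => (p.1, p.2, (0 : Int))) := rfl
  rw [hq0]
  have hInv0 : InvV n [((0 : Int), (0 : Int))] := by
    refine ⟨by simp, ?_⟩
    intro p hp
    simp only [List.mem_singleton] at hp
    subst hp
    exact ⟨le_refl 0, by omega, le_refl 0, by omega⟩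
  have hb1 := bridge n (knightMovesB x y) ((n * n).toNat + 1) ((n * n).toNat + 1)
    [((0 : Int), (0 : Int))] [((0 : Int), (0 : Int))] 0 hInv0
    (by simp only [muB]; split <;> omega)
    (by unfold muA; simp; omega)
  rw [hb1]
  have hbit0 : BitsOf n [((0 : Int), (0 : Int))] 1 := by
    intro t
    have h1 : (1 : Nat).testBit t = true ↔ t = 0 := by
      cases t with
      | zero => simp
      | succ k => simp [Nat.testBit_succ]
    rw [h1]
    have hg0 : inGrid n ((0 : Int), (0 : Int)) := ⟨le_refl 0, by omega, le_refl 0, by omega⟩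
    constructor
    · intro ht
      exact ⟨((0 : Int), (0 : Int)), List.mem_singleton.mpr rfl, hg0, by simp [ht, encB]⟩
    · rintro ⟨p, hpv, _, rfl⟩
      simp only [List.mem_singleton] at hpv
      subst hpv
      simp [encB]
  exact bridge2 n (knightMovesB x y) hn (n * n).toNat ((n * n).toNat + 1)
    [((0 : Int), (0 : Int))] [((0 : Int), (0 : Int))] 0 1 hInv0
    (fun p hp => hp)
    (by intro c hc hcf m _ _; exact absurd hc hcf)
    (fun h => h)
    (by intro _; simp)
    (by simp only [muB]; split <;> omega)
    hbit0

-- elementwise value of the row fold `for j in js: r[j] = g j`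
theorem rowFold_getElem? {α : Type} (g : Int → α) :
    ∀ (js : List Int) (r : List α) (m : Nat),
      js.Nodup → (∀ j ∈ js, 0 ≤ j) →
      (js.foldl (fun r j => PySem.List.pySetD r j (g j)) r)[m]?
      = if (m : Int) ∈ js then (r[m]?).map (fun _ => g (m : Int)) else r[m]? := by
  intro js
  induction js with
  | nil => intro r m _ _; simp
  | cons j0 js ih =>
    intro r m hnd hpos
    have hj0 : 0 ≤ j0 := hpos j0 (by simp)
    simp only [List.foldl_cons]
    rw [ih _ m hnd.of_cons (fun j hj => hpos j (by simp [hj]))]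
    rw [PySem.List.pySetD_of_nonneg _ _ hj0]
    by_cases he : (m : Int) = j0
    · have hm : j0.toNat = m := by omega
      have hnotin : (m : Int) ∉ js := by
        rw [he]; exact (List.nodup_cons.mp hnd).1
      rw [if_neg hnotin, if_pos (by simp [he])]
      by_cases hr : m < r.length
      · rw [hm, List.getElem?_set_self hr, List.getElem?_eq_getElem hr]
        simp [he]
      · rw [List.getElem?_eq_none (by simp; omega), List.getElem?_eq_none (by omega)]
        simp
    · have hne : j0.toNat ≠ m := by omega
      rw [List.getElem?_set_ne hne]
      by_cases hin : (m : Int) ∈ js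
      · rw [if_pos hin, if_pos (by simp [hin])]
      · rw [if_neg hin, if_neg (by simp [he, hin])]

-- the inner j-fold only rewrites row i of the board
theorem innerFold_eq {α : Type} (g : Int → α) (i : Int) :
    ∀ (js : List Int) (bd : List (List α)), 0 ≤ i → i.toNat < bd.length →
      js.foldl (fun bd2 j => PySem.List.pySetD bd2 i
          (PySem.List.pySetD (PySem.List.pyGetD bd2 i []) j (g j))) bd
      = PySem.List.pySetD bd i
          (js.foldl (fun r j => PySem.List.pySetD r j (g j)) (PySem.List.pyGetD bd i [])) := by
  intro js
  induction js with
  | nil =>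
    intro bd h0 hlen
    simp only [List.foldl_nil]
    rw [PySem.List.pySetD_of_nonneg _ _ h0, PySem.List.pyGetD_eq_getElem _ _ h0 (by omega)]
    exact (List.set_getElem_self hlen).symm
  | cons j0 js ih =>
    intro bd h0 hlen
    simp only [List.foldl_cons]
    set X := PySem.List.pySetD (PySem.List.pyGetD bd i []) j0 (g j0) with hX
    have hlen1 : i.toNat < (PySem.List.pySetD bd i X).length := by
      rw [PySem.List.pySetD_of_nonneg _ _ h0]; simpa using hlen
    rw [ih (PySem.List.pySetD bd i X) h0 hlen1]
    rw [PySem.List.pySetD_of_nonneg _ _ h0, PySem.List.pySetD_of_nonneg _ _ h0, PySem.List.pySetD_of_nonneg _ _ h0]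
    rw [List.set_set]
    congr 2
    rw [PySem.List.pyGetD_eq_getElem _ _ h0 (by simp; omega)]
    exact List.getElem_set_self (by simpa using hlen)

-- elementwise value of the board fold `for i in is: for j in js: bd[i][j] = f i j`
theorem boardFold_getElem? (f : Int → Int → Int) (js : List Int) :
    ∀ (is : List Int) (bd : List (List Int)) (k : Nat),
      is.Nodup → (∀ i ∈ is, 0 ≤ i ∧ i.toNat < bd.length) →
      (is.foldl (fun bd i => js.foldl (fun bd2 j => PySem.List.pySetD bd2 i
          (PySem.List.pySetD (PySem.List.pyGetD bd2 i []) j (f i j))) bd) bd)[k]?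
      = if (k : Int) ∈ is then
          (bd[k]?).map (fun row => js.foldl (fun r j => PySem.List.pySetD r j (f (k : Int) j)) row)
        else bd[k]? := by
  intro is
  induction is with
  | nil => intro bd k _ _; simp
  | cons i0 is ih =>
    intro bd k hnd hr
    obtain ⟨hi0, hi0len⟩ := hr i0 (by simp)
    simp only [List.foldl_cons]
    rw [innerFold_eq (f i0) i0 js bd hi0 hi0len]
    set bd1 := PySem.List.pySetD bd i0
      (js.foldl (fun r j => PySem.List.pySetD r j (f i0 j)) (PySem.List.pyGetD bd i0 [])) with hbd1
    have hlen1 : bd1.length = bd.length := by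
      rw [hbd1, PySem.List.pySetD_of_nonneg _ _ hi0]; simp
    rw [ih bd1 k hnd.of_cons (fun i hi => ⟨(hr i (by simp [hi])).1, by rw [hlen1]; exact (hr i (by simp [hi])).2⟩)]
    rw [hbd1, PySem.List.pySetD_of_nonneg _ _ hi0]
    by_cases he : (k : Int) = i0
    · have hm : i0.toNat = k := by omega
      have hnotin : (k : Int) ∉ is := by rw [he]; exact (List.nodup_cons.mp hnd).1
      rw [if_neg hnotin, if_pos (by simp [he])]
      rw [hm, List.getElem?_set_self (by omega), List.getElem?_eq_getElem (by omega)]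
      simp only [Option.map_some]
      rw [PySem.List.pyGetD_eq_getElem _ _ hi0 (by omega)]
      simp only [hm, he]
    · have hne : i0.toNat ≠ k := by omega
      rw [List.getElem?_set_ne hne]
      by_cases hin : (k : Int) ∈ is
      · rw [if_pos hin, if_pos (by simp [hin])]
      · rw [if_neg hin, if_neg (by simp [he, hin])]

-- the row of bfs values, after the j-loop, with its leading 0 dropped
theorem row_eq (n : Int) (hn : 1 ≤ n) (i : Int) :
    (((PySem.List.pyRange 1 n 1).foldl
        (fun r j => PySem.List.pySetD r j (bfsA n i j))
        ((PySem.List.pyRange 0 n 1).map (fun _ => (0 : Int))))).tail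
    = (PySem.List.pyRange 1 n 1).map (fun j => distB n i j) := by
  apply List.ext_getElem?
  intro m
  rw [List.getElem?_tail]
  rw [rowFold_getElem? (fun j => bfsA n i j) (PySem.List.pyRange 1 n 1) _ (m + 1)
    (PySem.List.nodup_pyRange_one 1 n)
    (fun j hj => by have := PySem.List.mem_pyRange_one.mp hj; omega)]
  rw [List.getElem?_map, List.getElem?_map, PySem.List.getElem?_pyRange_one, PySem.List.getElem?_pyRange_one]
  by_cases hm : ((m + 1 : Nat) : Int) ∈ PySem.List.pyRange 1 n 1
  · have hb := PySem.List.mem_pyRange_one.mp hm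
    rw [if_pos hm, if_pos (by omega), if_pos (by omega)]
    simp only [Option.map_some]
    rw [bfsA_eq_distB n i (↑(m + 1)) hn]
    rw [show ((m + 1 : Nat) : Int) = 1 + (m : Int) by push_cast; ring]
  · have hb : ¬ (1 ≤ ((m + 1 : Nat) : Int) ∧ ((m + 1 : Nat) : Int) < n) := fun h => hm (PySem.List.mem_pyRange_one.mpr h)
    rw [if_neg hm, if_neg (by omega), if_neg (by omega)]
    simp

theorem knightl_eq (n : Int) : knightlOnAChessboard n = knightlOnAChessboard_alt n := by
  by_cases hn : n ≤ 1
  · unfold knightlOnAChessboard knightlOnAChessboard_alt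
    rw [PySem.List.pyRange_one_eq_nil hn]
    simp only [List.foldl_nil, List.map_nil]
    rw [PySem.List.slice_from_one]
    apply List.eq_nil_of_length_eq_zero
    simp only [List.length_map, List.length_tail, PySem.List.length_pyRange_one]
    omega
  · have hn1 : 1 ≤ n := by omega
    unfold knightlOnAChessboard knightlOnAChessboard_alt
    simp only [PySem.List.slice_from_one]
    apply List.ext_getElem?
    intro r
    rw [List.getElem?_map, List.getElem?_tail]
    rw [boardFold_getElem? (fun i j => bfsA n i j) (PySem.List.pyRange 1 n 1) (PySem.List.pyRange 1 n 1)
      _ (r + 1) (PySem.List.nodup_pyRange_one 1 n)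
      (fun i hi' => by
        have := PySem.List.mem_pyRange_one.mp hi'
        constructor
        · omega
        · simp only [List.length_map, PySem.List.length_pyRange_one]
          omega)]
    rw [List.getElem?_map, List.getElem?_map, PySem.List.getElem?_pyRange_one, PySem.List.getElem?_pyRange_one]
    by_cases hr : ((r + 1 : Nat) : Int) ∈ PySem.List.pyRange 1 n 1
    · have hb := PySem.List.mem_pyRange_one.mp hr
      rw [if_pos hr, if_pos (by omega), if_pos (by omega)]
      simp only [Option.map_some]
      congr 1
      have := row_eq n hn1 ((r + 1 : Nat) : Int)
      rw [this]
      apply List.map_congr_left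
      intro j hj
      congr 1
      push_cast
      omega
    · have hb : ¬ (1 ≤ ((r + 1 : Nat) : Int) ∧ ((r + 1 : Nat) : Int) < n) := fun h => hr (PySem.List.mem_pyRange_one.mpr h)
      rw [if_neg hr, if_neg (by omega), if_neg (by omega)]
      simp

-- ===== VERDICT (by name: the statement is the Claim_ definition above) =====
theorem knightlOnAChessboard_spec : Claim_equal_knightlOnAChessboard := by
  intro n _
  unfold Spec_knightlOnAChessboard
  exact knightl_eq n
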